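-- pv_equiv track=rewrite | github.com/nldreplo/azsm | azsm/utils.py | get_disk_tiers
-- ===== SOURCE A (Python) =====
-- from typing import Dict, Optional, Tuple, Any
--
-- PREMIUM_DISK_SIZES = {
--     4: "P1",
--     8: "P2",
--     16: "P3",
--     32: "P4",
--     64: "P6",
--     128: "P10",
--     256: "P15",
--     512: "P20",
--     1024: "P30",
--     2048: "P40",
--     4096: "P50",
--     8192: "P60",
--     16384: "P70",
--     32767: "P80"
-- }
--
-- STANDARD_SSD_SIZES = {
--     4: "E1",
--     8: "E2",
--     16: "E3",
--     32: "E4",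
--     64: "E6",
--     128: "E10",
--     256: "E15",
--     512: "E20",
--     1024: "E30",
--     2048: "E40",
--     4096: "E50",
--     8192: "E60",
--     16384: "E70",
--     32767: "E80"
-- }
--
-- STANDARD_HDD_SIZES = {
--     32: "S4",
--     64: "S6",
--     128: "S10",
--     256: "S15",
--     512: "S20",
--     1024: "S30",
--     2048: "S40",
--     4096: "S50",
--     8192: "S60",
--     16384: "S70",
--     32767: "S80"
-- }
--
-- def get_disk_tiers(size_gb: int) -> Dict[str, str]:
--     """Get all possible disk tiers for a given size.
--
--     Args:
--         size_gb: Size of the disk in GB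
--
--     Returns:
--         Dictionary mapping disk types to their SKU names
--     """
--     tiers = {}
--
--     # Round up to nearest available size
--     available_sizes = sorted(PREMIUM_DISK_SIZES.keys())
--     target_size = next((s for s in available_sizes if s >= size_gb), available_sizes[-1])
--
--     if target_size in PREMIUM_DISK_SIZES:
--         tiers["Premium_LRS"] = PREMIUM_DISK_SIZES[target_size]
--     if target_size in STANDARD_SSD_SIZES:
--         tiers["StandardSSD_LRS"] = STANDARD_SSD_SIZES[target_size]
--     if target_size in STANDARD_HDD_SIZES:
--         tiers["Standard_LRS"] = STANDARD_HDD_SIZES[target_size]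
--
--     return tiers
-- ===== SOURCE B (Python) =====
-- # B: binary search over the sorted size table instead of a linear next()-scan,
-- # and direct tier construction (every target is a Premium/SSD key; HDD only from 32 up).
--
-- _TIERS = [
--     (4, "P1", "E1", None), (8, "P2", "E2", None), (16, "P3", "E3", None),
--     (32, "P4", "E4", "S4"), (64, "P6", "E6", "S6"), (128, "P10", "E10", "S10"),
--     (256, "P15", "E15", "S15"), (512, "P20", "E20", "S20"), (1024, "P30", "E30", "S30"),
--     (2048, "P40", "E40", "S40"), (4096, "P50", "E50", "S50"), (8192, "P60", "E60", "S60"),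
--     (16384, "P70", "E70", "S70"), (32767, "P80", "E80", "S80"),
-- ]
--
-- def get_disk_tiers(size_gb: int):
--     # binary search: leftmost row whose size >= size_gb (clamped to the last row)
--     lo, hi = 0, len(_TIERS) - 1
--     while lo < hi:
--         mid = (lo + hi) // 2
--         if _TIERS[mid][0] < size_gb:
--             lo = mid + 1
--         else:
--             hi = mid
--     _, p, e, s = _TIERS[lo]
--     tiers = {"Premium_LRS": p, "StandardSSD_LRS": e}
--     if s is not None:
--         tiers["Standard_LRS"] = s
--     return tiers
-- ===== Notes on version B (the rewrite author's own statement) =====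
-- stated objective: alternative
-- what changed: Replaces A's sort-the-dict-keys plus linear next()-scan (and three per-table membership lookups) by a binary search over one precomputed combined tier table from which all three SKU names are read directly.
import Mathlib
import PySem

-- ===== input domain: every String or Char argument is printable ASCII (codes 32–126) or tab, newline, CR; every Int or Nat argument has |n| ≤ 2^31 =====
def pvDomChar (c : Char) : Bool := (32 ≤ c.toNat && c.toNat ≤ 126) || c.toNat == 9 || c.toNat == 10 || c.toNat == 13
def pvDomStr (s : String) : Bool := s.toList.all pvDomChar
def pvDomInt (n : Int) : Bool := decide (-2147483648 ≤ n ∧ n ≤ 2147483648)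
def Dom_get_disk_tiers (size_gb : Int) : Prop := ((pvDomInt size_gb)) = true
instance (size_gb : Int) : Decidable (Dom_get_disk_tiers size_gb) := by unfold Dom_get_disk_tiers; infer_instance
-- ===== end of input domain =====

-- B replaces A's linear next()-scan over the sorted keys by a binary search over one
-- combined tier table (objective: alternative/idiomatic; same cost on this fixed table).

-- ===== PORT A =====
def PREMIUM_DISK_SIZES : PySem.Dict Int String := PySem.Dict.ofList
  [(4, "P1"), (8, "P2"), (16, "P3"), (32, "P4"), (64, "P6"), (128, "P10"), (256, "P15"),
   (512, "P20"), (1024, "P30"), (2048, "P40"), (4096, "P50"), (8192, "P60"), (16384, "P70"), (32767, "P80")]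

def STANDARD_SSD_SIZES : PySem.Dict Int String := PySem.Dict.ofList
  [(4, "E1"), (8, "E2"), (16, "E3"), (32, "E4"), (64, "E6"), (128, "E10"), (256, "E15"),
   (512, "E20"), (1024, "E30"), (2048, "E40"), (4096, "E50"), (8192, "E60"), (16384, "E70"), (32767, "E80")]

def STANDARD_HDD_SIZES : PySem.Dict Int String := PySem.Dict.ofList
  [(32, "S4"), (64, "S6"), (128, "S10"), (256, "S15"), (512, "S20"), (1024, "S30"),
   (2048, "S40"), (4096, "S50"), (8192, "S60"), (16384, "S70"), (32767, "S80")]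

def get_disk_tiers (size_gb : Int) : List (String × String) :=
  let tiers : PySem.Dict String String := PySem.Dict.empty
  let available_sizes := PySem.List.sorted PREMIUM_DISK_SIZES.keys (fun s => s)
  let target_size := (available_sizes.find? (fun s => decide (size_gb ≤ s))).getD
      (PySem.List.pyGetD available_sizes (-1) 0)
  let tiers := if PREMIUM_DISK_SIZES.contains target_size then
      tiers.insert "Premium_LRS" (PREMIUM_DISK_SIZES.getD target_size "") else tiers
  let tiers := if STANDARD_SSD_SIZES.contains target_size then
      tiers.insert "StandardSSD_LRS" (STANDARD_SSD_SIZES.getD target_size "") else tiers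
  let tiers := if STANDARD_HDD_SIZES.contains target_size then
      tiers.insert "Standard_LRS" (STANDARD_HDD_SIZES.getD target_size "") else tiers
  tiers.items

-- ===== PORT B =====
def pvTiers : List (Int × String × String × Option String) :=
  [(4, "P1", "E1", none), (8, "P2", "E2", none), (16, "P3", "E3", none),
   (32, "P4", "E4", some "S4"), (64, "P6", "E6", some "S6"), (128, "P10", "E10", some "S10"),
   (256, "P15", "E15", some "S15"), (512, "P20", "E20", some "S20"), (1024, "P30", "E30", some "S30"),
   (2048, "P40", "E40", some "S40"), (4096, "P50", "E50", some "S50"), (8192, "P60", "E60", some "S60"),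
   (16384, "P70", "E70", some "S70"), (32767, "P80", "E80", some "S80")]

-- the while-loop of Source B, as recursion on hi - lo
def pvBsearch (size_gb : Int) (lo hi : Nat) : Nat :=
  if lo < hi then
    let mid := (lo + hi) / 2
    if (PySem.List.pyGetD pvTiers (mid : Int) (0, "", "", none)).1 < size_gb then
      pvBsearch size_gb (mid + 1) hi
    else
      pvBsearch size_gb lo mid
  else lo
termination_by hi - lo
decreasing_by all_goals omega

def get_disk_tiers_alt (size_gb : Int) : List (String × String) :=
  let lo := pvBsearch size_gb 0 (pvTiers.length - 1)
  let row := PySem.List.pyGetD pvTiers (lo : Int) (0, "", "", none)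
  let tiers : PySem.Dict String String :=
    (PySem.Dict.empty.insert "Premium_LRS" row.2.1).insert "StandardSSD_LRS" row.2.2.1
  let tiers := match row.2.2.2 with
    | some s => tiers.insert "Standard_LRS" s
    | none => tiers
  tiers.items

-- ===== PRECONDITION & SPEC =====
def Spec_get_disk_tiers (size_gb : Int) (out : List (String × String)) : Prop := out = get_disk_tiers_alt size_gb
instance (size_gb : Int) (out : List (String × String)) : Decidable (Spec_get_disk_tiers size_gb out) := by unfold Spec_get_disk_tiers; infer_instance

-- ===== CLAIM (what is proved, stated in full; the proofs are below) =====
def Claim_equal_get_disk_tiers : Prop := ∀ (size_gb : Int), Dom_get_disk_tiers size_gb → Spec_get_disk_tiers size_gb (get_disk_tiers size_gb)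

-- ===== LEMMAS AND PROOFS =====

-- ===== VERDICT (by name: the statement is the Claim_ definition above) =====
set_option maxHeartbeats 1000000 in
theorem get_disk_tiers_spec : Claim_equal_get_disk_tiers := by
  intro s _
  unfold Spec_get_disk_tiers
  have havail : PySem.List.sorted PREMIUM_DISK_SIZES.keys (fun s => s) =
      [4, 8, 16, 32, 64, 128, 256, 512, 1024, 2048, 4096, 8192, 16384, 32767] := by decide
  unfold get_disk_tiers
  by_cases h0 : s ≤ 4
  · simp [havail, List.find?, get_disk_tiers_alt, pvBsearch, pvTiers, PySem.List.pyGetD, (show s ≤ 4 by omega), (show s ≤ 8 by omega), (show s ≤ 16 by omega), (show s ≤ 32 by omega), (show s ≤ 64 by omega), (show s ≤ 128 by omega), (show s ≤ 256 by omega), (show s ≤ 512 by omega), (show s ≤ 1024 by omega), (show s ≤ 2048 by omega), (show s ≤ 4096 by omega), (show s ≤ 8192 by omega), (show s ≤ 16384 by omega), (show s ≤ 32767 by omega), (show ¬ (4:Int) < s by omega), (show ¬ (8:Int) < s by omega), (show ¬ (16:Int) < s by omega), (show ¬ (32:Int) < s by omega), (show ¬ (64:Int) < s by omega), (show ¬ (128:Int)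 < s by omega), (show ¬ (256:Int) < s by omega), (show ¬ (512:Int) < s by omega), (show ¬ (1024:Int) < s by omega), (show ¬ (2048:Int) < s by omega), (show ¬ (4096:Int) < s by omega), (show ¬ (8192:Int) < s by omega), (show ¬ (16384:Int) < s by omega)] <;> decide
  by_cases h1 : s ≤ 8
  · simp [havail, List.find?, get_disk_tiers_alt, pvBsearch, pvTiers, PySem.List.pyGetD, (show ¬ s ≤ 4 by omega), (show s ≤ 8 by omega), (show s ≤ 16 by omega), (show s ≤ 32 by omega), (show s ≤ 64 by omega), (show s ≤ 128 by omega), (show s ≤ 256 by omega), (show s ≤ 512 by omega), (show s ≤ 1024 by omega), (show s ≤ 2048 by omega), (show s ≤ 4096 by omega), (show s ≤ 8192 by omega), (show s ≤ 16384 by omega), (show s ≤ 32767 by omega), (show (4:Int) < s by omega), (show ¬ (8:Int) < s by omega), (show ¬ (16:Int) < s by omega), (show ¬ (32:Int) < s by omega), (show ¬ (64:Int) < s by omega), (show ¬ (128:Int) < s by omega), (show ¬ (256:Int) < s by omega), (show ¬ (512:Int) < s by omega), (show ¬ (1024:Int) < s by omega), (show ¬ (2048:Int) < s by omega), (show ¬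 (4096:Int) < s by omega), (show ¬ (8192:Int) < s by omega), (show ¬ (16384:Int) < s by omega)] <;> decide
  by_cases h2 : s ≤ 16
  · simp [havail, List.find?, get_disk_tiers_alt, pvBsearch, pvTiers, PySem.List.pyGetD, (show ¬ s ≤ 4 by omega), (show ¬ s ≤ 8 by omega), (show s ≤ 16 by omega), (show s ≤ 32 by omega), (show s ≤ 64 by omega), (show s ≤ 128 by omega), (show s ≤ 256 by omega), (show s ≤ 512 by omega), (show s ≤ 1024 by omega), (show s ≤ 2048 by omega), (show s ≤ 4096 by omega), (show s ≤ 8192 by omega), (show s ≤ 16384 by omega), (show s ≤ 32767 by omega), (show (4:Int) < s by omega), (show (8:Int) < s by omega), (show ¬ (16:Int) < s by omega), (show ¬ (32:Int) < s by omega), (show ¬ (64:Int) < s by omega), (show ¬ (128:Int) < s by omega), (show ¬ (256:Int) < s by omega), (show ¬ (512:Int) < s by omega), (show ¬ (1024:Int) < s by omega), (show ¬ (2048:Int) < s by omega), (show ¬ (4096:Int) < s by omega), (show ¬ (8192:Int) < s by omega), (show ¬ (16384:Int) < s by omega)] <;> decide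
  by_cases h3 : s ≤ 32
  · simp [havail, List.find?, get_disk_tiers_alt, pvBsearch, pvTiers, PySem.List.pyGetD, (show ¬ s ≤ 4 by omega), (show ¬ s ≤ 8 by omega), (show ¬ s ≤ 16 by omega), (show s ≤ 32 by omega), (show s ≤ 64 by omega), (show s ≤ 128 by omega), (show s ≤ 256 by omega), (show s ≤ 512 by omega), (show s ≤ 1024 by omega), (show s ≤ 2048 by omega), (show s ≤ 4096 by omega), (show s ≤ 8192 by omega), (show s ≤ 16384 by omega), (show s ≤ 32767 by omega), (show (4:Int) < s by omega), (show (8:Int) < s by omega), (show (16:Int) < s by omega), (show ¬ (32:Int) < s by omega), (show ¬ (64:Int) < s by omega), (show ¬ (128:Int) < s by omega), (show ¬ (256:Int) < s by omega), (show ¬ (512:Int) < s by omega), (show ¬ (1024:Int) < s by omega), (show ¬ (2048:Int) < s by omega), (show ¬ (4096:Int) < s by omega), (show ¬ (8192:Int) < s by omega), (show ¬ (16384:Int) < s by omega)] <;> decide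
  by_cases h4 : s ≤ 64
  · simp [havail, List.find?, get_disk_tiers_alt, pvBsearch, pvTiers, PySem.List.pyGetD, (show ¬ s ≤ 4 by omega), (show ¬ s ≤ 8 by omega), (show ¬ s ≤ 16 by omega), (show ¬ s ≤ 32 by omega), (show s ≤ 64 by omega), (show s ≤ 128 by omega), (show s ≤ 256 by omega), (show s ≤ 512 by omega), (show s ≤ 1024 by omega), (show s ≤ 2048 by omega), (show s ≤ 4096 by omega), (show s ≤ 8192 by omega), (show s ≤ 16384 by omega), (show s ≤ 32767 by omega), (show (4:Int) < s by omega), (show (8:Int) < s by omega), (show (16:Int) < s by omega), (show (32:Int) < s by omega), (show ¬ (64:Int) < s by omega), (show ¬ (128:Int) < s by omega), (show ¬ (256:Int) < s by omega), (show ¬ (512:Int) < s by omega), (show ¬ (1024:Int) < s by omega), (show ¬ (2048:Int) < s by omega), (show ¬ (4096:Int) < s by omega), (show ¬ (8192:Int) < s by omega), (show ¬ (16384:Int) < s by omega)] <;> decide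
  by_cases h5 : s ≤ 128
  · simp [havail, List.find?, get_disk_tiers_alt, pvBsearch, pvTiers, PySem.List.pyGetD, (show ¬ s ≤ 4 by omega), (show ¬ s ≤ 8 by omega), (show ¬ s ≤ 16 by omega), (show ¬ s ≤ 32 by omega), (show ¬ s ≤ 64 by omega), (show s ≤ 128 by omega), (show s ≤ 256 by omega), (show s ≤ 512 by omega), (show s ≤ 1024 by omega), (show s ≤ 2048 by omega), (show s ≤ 4096 by omega), (show s ≤ 8192 by omega), (show s ≤ 16384 by omega), (show s ≤ 32767 by omega), (show (4:Int) < s by omega), (show (8:Int) < s by omega), (show (16:Int) < s by omega), (show (32:Int) < s by omega), (show (64:Int) < s by omega), (show ¬ (128:Int) < s by omega), (show ¬ (256:Int) < s by omega), (show ¬ (512:Int) < s by omega), (show ¬ (1024:Int) < s by omega), (show ¬ (2048:Int) < s by omega), (show ¬ (4096:Int) < s by omega), (show ¬ (8192:Int) < s by omega), (show ¬ (16384:Int) < s by omega)] <;> decide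
  by_cases h6 : s ≤ 256
  · simp [havail, List.find?, get_disk_tiers_alt, pvBsearch, pvTiers, PySem.List.pyGetD, (show ¬ s ≤ 4 by omega), (show ¬ s ≤ 8 by omega), (show ¬ s ≤ 16 by omega), (show ¬ s ≤ 32 by omega), (show ¬ s ≤ 64 by omega), (show ¬ s ≤ 128 by omega), (show s ≤ 256 by omega), (show s ≤ 512 by omega), (show s ≤ 1024 by omega), (show s ≤ 2048 by omega), (show s ≤ 4096 by omega), (show s ≤ 8192 by omega), (show s ≤ 16384 by omega), (show s ≤ 32767 by omega), (show (4:Int) < s by omega), (show (8:Int) < s by omega), (show (16:Int) < s by omega), (show (32:Int) < s by omega), (show (64:Int) < s by omega), (show (128:Int) < s by omega), (show ¬ (256:Int) < s by omega), (show ¬ (512:Int) < s by omega), (show ¬ (1024:Int) < s by omega), (show ¬ (2048:Int) < s by omega), (show ¬ (4096:Int) < s by omega), (show ¬ (8192:Int) < s by omega), (show ¬ (16384:Int) < s by omega)] <;> decide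
  by_cases h7 : s ≤ 512
  · simp [havail, List.find?, get_disk_tiers_alt, pvBsearch, pvTiers, PySem.List.pyGetD, (show ¬ s ≤ 4 by omega), (show ¬ s ≤ 8 by omega), (show ¬ s ≤ 16 by omega), (show ¬ s ≤ 32 by omega), (show ¬ s ≤ 64 by omega), (show ¬ s ≤ 128 by omega), (show ¬ s ≤ 256 by omega), (show s ≤ 512 by omega), (show s ≤ 1024 by omega), (show s ≤ 2048 by omega), (show s ≤ 4096 by omega), (show s ≤ 8192 by omega), (show s ≤ 16384 by omega), (show s ≤ 32767 by omega), (show (4:Int) < s by omega), (show (8:Int) < s by omega), (show (16:Int) < s by omega), (show (32:Int) < s by omega), (show (64:Int) < s by omega), (show (128:Int) < s by omega), (show (256:Int) < s by omega), (show ¬ (512:Int) < s by omega), (show ¬ (1024:Int) < s by omega), (show ¬ (2048:Int) < s by omega), (show ¬ (4096:Int) < s by omega), (show ¬ (8192:Int) < s by omega), (show ¬ (16384:Int) < s by omega)] <;> decide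
  by_cases h8 : s ≤ 1024
  · simp [havail, List.find?, get_disk_tiers_alt, pvBsearch, pvTiers, PySem.List.pyGetD, (show ¬ s ≤ 4 by omega), (show ¬ s ≤ 8 by omega), (show ¬ s ≤ 16 by omega), (show ¬ s ≤ 32 by omega), (show ¬ s ≤ 64 by omega), (show ¬ s ≤ 128 by omega), (show ¬ s ≤ 256 by omega), (show ¬ s ≤ 512 by omega), (show s ≤ 1024 by omega), (show s ≤ 2048 by omega), (show s ≤ 4096 by omega), (show s ≤ 8192 by omega), (show s ≤ 16384 by omega), (show s ≤ 32767 by omega), (show (4:Int) < s by omega), (show (8:Int) < s by omega), (show (16:Int) < s by omega), (show (32:Int) < s by omega), (show (64:Int) < s by omega), (show (128:Int) < s by omega), (show (256:Int) < s by omega), (show (512:Int) < s by omega), (show ¬ (1024:Int) < s by omega), (show ¬ (2048:Int) < s by omega), (show ¬ (4096:Int) < s by omega), (show ¬ (8192:Int) < s by omega), (show ¬ (16384:Int) < s by omega)] <;> decide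
  by_cases h9 : s ≤ 2048
  · simp [havail, List.find?, get_disk_tiers_alt, pvBsearch, pvTiers, PySem.List.pyGetD, (show ¬ s ≤ 4 by omega), (show ¬ s ≤ 8 by omega), (show ¬ s ≤ 16 by omega), (show ¬ s ≤ 32 by omega), (show ¬ s ≤ 64 by omega), (show ¬ s ≤ 128 by omega), (show ¬ s ≤ 256 by omega), (show ¬ s ≤ 512 by omega), (show ¬ s ≤ 1024 by omega), (show s ≤ 2048 by omega), (show s ≤ 4096 by omega), (show s ≤ 8192 by omega), (show s ≤ 16384 by omega), (show s ≤ 32767 by omega), (show (4:Int) < s by omega), (show (8:Int) < s by omega), (show (16:Int) < s by omega), (show (32:Int) < s by omega), (show (64:Int) < s by omega), (show (128:Int) < s by omega), (show (256:Int) < s by omega), (show (512:Int) < s by omega), (show (1024:Int) < s by omega), (show ¬ (2048:Int) < s by omega), (show ¬ (4096:Int) < s by omega), (show ¬ (8192:Int) < s by omega), (show ¬ (16384:Int) < s by omega)] <;> decide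
  by_cases h10 : s ≤ 4096
  · simp [havail, List.find?, get_disk_tiers_alt, pvBsearch, pvTiers, PySem.List.pyGetD, (show ¬ s ≤ 4 by omega), (show ¬ s ≤ 8 by omega), (show ¬ s ≤ 16 by omega), (show ¬ s ≤ 32 by omega), (show ¬ s ≤ 64 by omega), (show ¬ s ≤ 128 by omega), (show ¬ s ≤ 256 by omega), (show ¬ s ≤ 512 by omega), (show ¬ s ≤ 1024 by omega), (show ¬ s ≤ 2048 by omega), (show s ≤ 4096 by omega), (show s ≤ 8192 by omega), (show s ≤ 16384 by omega), (show s ≤ 32767 by omega), (show (4:Int) < s by omega), (show (8:Int) < s by omega), (show (16:Int) < s by omega), (show (32:Int) < s by omega), (show (64:Int) < s by omega), (show (128:Int) < s by omega), (show (256:Int) < s by omega), (show (512:Int) < s by omega), (show (1024:Int) < s by omega), (show (2048:Int) < s by omega), (show ¬ (4096:Int) < s by omega), (show ¬ (8192:Int) < s by omega), (show ¬ (16384:Int) < s by omega)] <;> decide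
  by_cases h11 : s ≤ 8192
  · simp [havail, List.find?, get_disk_tiers_alt, pvBsearch, pvTiers, PySem.List.pyGetD, (show ¬ s ≤ 4 by omega), (show ¬ s ≤ 8 by omega), (show ¬ s ≤ 16 by omega), (show ¬ s ≤ 32 by omega), (show ¬ s ≤ 64 by omega), (show ¬ s ≤ 128 by omega), (show ¬ s ≤ 256 by omega), (show ¬ s ≤ 512 by omega), (show ¬ s ≤ 1024 by omega), (show ¬ s ≤ 2048 by omega), (show ¬ s ≤ 4096 by omega), (show s ≤ 8192 by omega), (show s ≤ 16384 by omega), (show s ≤ 32767 by omega), (show (4:Int) < s by omega), (show (8:Int) < s by omega), (show (16:Int) < s by omega), (show (32:Int) < s by omega), (show (64:Int) < s by omega), (show (128:Int) < s by omega), (show (256:Int) < s by omega), (show (512:Int) < s by omega), (show (1024:Int) < s by omega), (show (2048:Int) < s by omega), (show (4096:Int) < s by omega), (show ¬ (8192:Int) < s by omega), (show ¬ (16384:Int) < s by omega)] <;> decide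
  by_cases h12 : s ≤ 16384
  · simp [havail, List.find?, get_disk_tiers_alt, pvBsearch, pvTiers, PySem.List.pyGetD, (show ¬ s ≤ 4 by omega), (show ¬ s ≤ 8 by omega), (show ¬ s ≤ 16 by omega), (show ¬ s ≤ 32 by omega), (show ¬ s ≤ 64 by omega), (show ¬ s ≤ 128 by omega), (show ¬ s ≤ 256 by omega), (show ¬ s ≤ 512 by omega), (show ¬ s ≤ 1024 by omega), (show ¬ s ≤ 2048 by omega), (show ¬ s ≤ 4096 by omega), (show ¬ s ≤ 8192 by omega), (show s ≤ 16384 by omega), (show s ≤ 32767 by omega), (show (4:Int) < s by omega), (show (8:Int) < s by omega), (show (16:Int) < s by omega), (show (32:Int) < s by omega), (show (64:Int) < s by omega), (show (128:Int) < s by omega), (show (256:Int) < s by omega), (show (512:Int) < s by omega), (show (1024:Int) < s by omega), (show (2048:Int) < s by omega), (show (4096:Int) < s by omega), (show (8192:Int) < s by omega), (show ¬ (16384:Int) < s by omega)] <;> decide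
  -- s > 16384: target is 32767 whether or not s ≤ 32767
  by_cases h13 : s ≤ 32767
  · simp [havail, List.find?, get_disk_tiers_alt, pvBsearch, pvTiers, PySem.List.pyGetD, (show ¬ s ≤ 4 by omega), (show ¬ s ≤ 8 by omega), (show ¬ s ≤ 16 by omega), (show ¬ s ≤ 32 by omega), (show ¬ s ≤ 64 by omega), (show ¬ s ≤ 128 by omega), (show ¬ s ≤ 256 by omega), (show ¬ s ≤ 512 by omega), (show ¬ s ≤ 1024 by omega), (show ¬ s ≤ 2048 by omega), (show ¬ s ≤ 4096 by omega), (show ¬ s ≤ 8192 by omega), (show ¬ s ≤ 16384 by omega), (show (4:Int) < s by omega), (show (8:Int) < s by omega), (show (16:Int) < s by omega), (show (32:Int) < s by omega), (show (64:Int) < s by omega), (show (128:Int) < s by omega), (show (256:Int) < s by omega), (show (512:Int) < s by omega), (show (1024:Int) < s by omega), (show (2048:Int) < s by omega), (show (4096:Int) < s by omega), (show (8192:Int) < s by omega), (show (16384:Int) < s by omega)] <;> simp [h13] <;> decide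
  · simp [havail, List.find?, get_disk_tiers_alt, pvBsearch, pvTiers, PySem.List.pyGetD, (show ¬ s ≤ 4 by omega), (show ¬ s ≤ 8 by omega), (show ¬ s ≤ 16 by omega), (show ¬ s ≤ 32 by omega), (show ¬ s ≤ 64 by omega), (show ¬ s ≤ 128 by omega), (show ¬ s ≤ 256 by omega), (show ¬ s ≤ 512 by omega), (show ¬ s ≤ 1024 by omega), (show ¬ s ≤ 2048 by omega), (show ¬ s ≤ 4096 by omega), (show ¬ s ≤ 8192 by omega), (show ¬ s ≤ 16384 by omega), (show (4:Int) < s by omega), (show (8:Int) < s by omega), (show (16:Int) < s by omega), (show (32:Int) < s by omega), (show (64:Int) < s by omega), (show (128:Int) < s by omega), (show (256:Int) < s by omega), (show (512:Int) < s by omega), (show (1024:Int) < s by omega), (show (2048:Int) < s by omega), (show (4096:Int) < s by omega), (show (8192:Int) < s by omega), (show (16384:Int) < s by omega)] <;> simp [h13] <;> decide
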